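-- pv_equiv track=rewrite | github.com/Dom4489/Instagram-Unfollow-Checker | GetUnfollowers.py | findDoNotFollowBack
-- ===== SOURCE A (Python) =====
-- def findDoNotFollowBack(followers, following):
--     followers.sort()
--     following.sort()
--     notFollowingBack = []
--     for i in range(len(followers)):
--         try:
--             following.index(followers[i])
--         except ValueError:
--             notFollowingBack += [followers[i]]
--     return notFollowingBack
-- ===== SOURCE B (Python) =====
-- def findDoNotFollowBack(followers, following):
--     followers.sort()
--     following.sort()
--     notFollowingBack = []
--     j = 0
--     n = len(following)
--     for f in followers:
--         while j < n and following[j] < f: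
--             j += 1
--         if j < n and following[j] == f:
--             continue
--         notFollowingBack.append(f)
--     return notFollowingBack
-- ===== Notes on version B (the rewrite author's own statement) =====
-- stated objective: faster
-- what changed: Replaces the per-follower linear list.index scan over following with a single two-pointer merge over the two sorted lists, sharing one monotone index into following.
import Mathlib
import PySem

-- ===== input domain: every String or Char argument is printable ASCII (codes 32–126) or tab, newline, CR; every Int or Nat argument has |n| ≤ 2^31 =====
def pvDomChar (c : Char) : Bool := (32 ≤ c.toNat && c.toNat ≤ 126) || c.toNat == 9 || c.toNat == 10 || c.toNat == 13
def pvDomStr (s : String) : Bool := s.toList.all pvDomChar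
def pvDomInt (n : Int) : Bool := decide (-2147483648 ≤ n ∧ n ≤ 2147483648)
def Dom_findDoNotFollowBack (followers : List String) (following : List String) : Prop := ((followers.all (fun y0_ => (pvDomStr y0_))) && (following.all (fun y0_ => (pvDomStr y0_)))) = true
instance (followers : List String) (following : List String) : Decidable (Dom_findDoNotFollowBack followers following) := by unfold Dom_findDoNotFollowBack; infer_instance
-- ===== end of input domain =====

-- B replaces A's per-follower linear `list.index` scan with a two-pointer merge over the two
-- sorted lists (objective: faster). Both Pythons sort both arguments in place; the equivalence
-- proved here is about the RETURN value only (B performs the same mutations as A).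

-- ===== PORT A =====
def findDoNotFollowBack (followers : List String) (following : List String) : List String :=
  let fs := PySem.List.sorted followers (fun x => x) false
  let gs := PySem.List.sorted following (fun x => x) false
  (PySem.List.pyRange 0 (fs.length : Int) 1).foldl
    (fun acc i =>
      match PySem.List.index? gs (PySem.List.pyGetD fs i "") with
      | some _ => acc
      | none => acc ++ [PySem.List.pyGetD fs i ""]) []

-- ===== PORT B =====
-- the inner `while j < n and following[j] < f: j += 1` loop; gs[j]? = some g captures j < n
def pvAdvance (gs : List String) (f : String) : Nat → Nat → Nat
  | j, fuel + 1 =>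
    match gs[j]? with
    | some g => if g < f then pvAdvance gs f (j + 1) fuel else j
    | none => j
  | j, 0 => j

def findDoNotFollowBack_alt (followers : List String) (following : List String) : List String :=
  let fs := PySem.List.sorted followers (fun x => x) false
  let gs := PySem.List.sorted following (fun x => x) false
  (fs.foldl
    (fun (st : List String × Nat) f =>
      let j := pvAdvance gs f st.2 gs.length
      if gs[j]? = some f then (st.1, j) else (st.1 ++ [f], j))
    ([], 0)).1

-- ===== PRECONDITION & SPEC =====
def Spec_findDoNotFollowBack (followers : List String) (following : List String) (out : List String) : Prop := out = findDoNotFollowBack_alt followers following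
instance (followers : List String) (following : List String) (out : List String) : Decidable (Spec_findDoNotFollowBack followers following out) := by unfold Spec_findDoNotFollowBack; infer_instance

-- ===== CLAIM (what is proved, stated in full; the proofs are below) =====
def Claim_equal_findDoNotFollowBack : Prop := ∀ (followers : List String) (following : List String), Dom_findDoNotFollowBack followers following → Spec_findDoNotFollowBack followers following (findDoNotFollowBack followers following)

-- ===== LEMMAS AND PROOFS =====

-- A's loop is filtering by membership in gs
theorem pvA_foldl_filter (gs : List String) :
    ∀ (fs acc : List String),
      fs.foldl
        (fun acc f =>
          match PySem.List.index? gs f with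
          | some _ => acc
          | none => acc ++ [f]) acc
        = acc ++ fs.filter (fun f => !gs.contains f) := by
  intro fs
  induction fs with
  | nil => intro acc; simp
  | cons f t ih =>
    intro acc
    simp only [List.foldl_cons, List.filter_cons]
    rcases h : PySem.List.index? gs f with _ | k
    · have hmem : f ∉ gs := (PySem.List.index?_eq_none_iff gs f).mp h
      rw [ih]
      simp [hmem]
    · have hmem : f ∈ gs := (PySem.List.index?_isSome_iff gs f).mp (by rw [h]; rfl)
      rw [ih]
      simp [hmem]

-- unfolding equations for pvAdvance's three cases
theorem pvAdvance_none (gs : List String) (f : String) (j fuel : Nat)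
    (hj : gs[j]? = none) : pvAdvance gs f j (fuel + 1) = j := by
  simp [pvAdvance, hj]

theorem pvAdvance_lt (gs : List String) (f : String) (j fuel : Nat) (g : String)
    (hj : gs[j]? = some g) (hlt : g < f) :
    pvAdvance gs f j (fuel + 1) = pvAdvance gs f (j + 1) fuel := by
  simp [pvAdvance, hj, hlt]

theorem pvAdvance_ge (gs : List String) (f : String) (j fuel : Nat) (g : String)
    (hj : gs[j]? = some g) (hlt : ¬ g < f) :
    pvAdvance gs f j (fuel + 1) = j := by
  simp [pvAdvance, hj, hlt]

-- everything skipped by pvAdvance is < f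
theorem pvAdvance_skipped (gs : List String) (f : String) :
    ∀ fuel j k, j ≤ k → k < pvAdvance gs f j fuel →
      ∀ g, gs[k]? = some g → g < f := by
  intro fuel
  induction fuel with
  | zero => intro j k h1 h2; simp [pvAdvance] at h2; omega
  | succ fuel ih =>
    intro j k h1 h2 g hg
    rcases hj : gs[j]? with _ | gj
    · rw [pvAdvance_none gs f j fuel hj] at h2; omega
    · by_cases hlt : gj < f
      · rw [pvAdvance_lt gs f j fuel gj hj hlt] at h2
        rcases Nat.eq_or_lt_of_le h1 with rfl | hjk
        · rw [hj] at hg; cases hg; exact hlt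
        · exact ih (j + 1) k hjk h2 g hg
      · rw [pvAdvance_ge gs f j fuel gj hj hlt] at h2; omega

-- pvAdvance stops at an element not < f (when in range)
theorem pvAdvance_stop (gs : List String) (f : String) :
    ∀ fuel j, gs.length - j ≤ fuel →
      ∀ g, gs[pvAdvance gs f j fuel]? = some g → ¬ g < f := by
  intro fuel
  induction fuel with
  | zero =>
    intro j hf g hg
    simp only [pvAdvance] at hg
    have : j < gs.length := (List.getElem?_eq_some_iff.mp hg).1
    omega
  | succ fuel ih =>
    intro j hf g hg
    rcases hj : gs[j]? with _ | gj
    · rw [pvAdvance_none gs f j fuel hj] at hg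
      rw [hj] at hg; cases hg
    · by_cases hlt : gj < f
      · rw [pvAdvance_lt gs f j fuel gj hj hlt] at hg
        have hjlen : j < gs.length := (List.getElem?_eq_some_iff.mp hj).1
        exact ih (j + 1) (by omega) g hg
      · rw [pvAdvance_ge gs f j fuel gj hj hlt] at hg
        rw [hj] at hg; cases hg; exact hlt

-- the two-pointer loop computes the same filter, given both lists sorted and the invariant
theorem pvB_foldl_filter (gs : List String) (hgs : gs.Pairwise (· ≤ ·)) :
    ∀ (fs acc : List String) (j : Nat),
      fs.Pairwise (· ≤ ·) →
      (∀ k, k < j → ∀ g, gs[k]? = some g → ∀ x ∈ fs, g < x) →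
      (fs.foldl
        (fun (st : List String × Nat) f =>
          let j := pvAdvance gs f st.2 gs.length
          if gs[j]? = some f then (st.1, j) else (st.1 ++ [f], j))
        (acc, j)).1 = acc ++ fs.filter (fun f => !gs.contains f) := by
  intro fs
  induction fs with
  | nil => intro acc j _ _; simp
  | cons f t ih =>
    intro acc j hsorted hinv
    have hhead : ∀ x ∈ t, f ≤ x := fun x hx => (List.pairwise_cons.mp hsorted).1 x hx
    have htsorted : t.Pairwise (· ≤ ·) := (List.pairwise_cons.mp hsorted).2
    set r := pvAdvance gs f j gs.length with hr
    -- everything strictly before r is < f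
    have hbefore : ∀ k, k < r → ∀ g, gs[k]? = some g → g < f := by
      intro k hk g hg
      by_cases hkj : k < j
      · exact hinv k hkj g hg f (by simp)
      · exact pvAdvance_skipped gs f gs.length j k (by omega) hk g hg
    have hfuel : gs.length - j ≤ gs.length := by omega
    -- new invariant for the tail
    have hinv' : ∀ k, k < r → ∀ g, gs[k]? = some g → ∀ x ∈ t, g < x := by
      intro k hk g hg x hx
      exact lt_of_lt_of_le (hbefore k hk g hg) (hhead x hx)
    simp only [List.foldl_cons, List.filter_cons]
    by_cases hcase : gs[r]? = some f
    · have hmem : f ∈ gs := by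
        rcases List.getElem?_eq_some_iff.mp hcase with ⟨hk, hkeq⟩
        exact hkeq ▸ List.getElem_mem hk
      rw [if_pos hcase, ih acc r htsorted hinv']
      simp [hmem]
    · have hnotmem : f ∉ gs := by
        intro hmem
        rcases List.getElem_of_mem hmem with ⟨k, hk, hkeq⟩
        by_cases hkr : k < r
        · have := hbefore k hkr gs[k] (List.getElem?_eq_some_iff.mpr ⟨hk, rfl⟩)
          rw [hkeq] at this
          exact lt_irrefl f this
        · have hrlen : r < gs.length := by omega
          have hgr : gs[r]? = some gs[r] := List.getElem?_eq_some_iff.mpr ⟨hrlen, rfl⟩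
          have hstop : ¬ gs[r] < f := pvAdvance_stop gs f gs.length j hfuel gs[r] hgr
          have hne : gs[r] ≠ f := fun h => hcase (h ▸ hgr)
          have hflt : f < gs[r] := lt_of_le_of_ne (not_lt.mp hstop) (Ne.symm hne)
          have hle : gs[r] ≤ gs[k] := by
            rcases Nat.eq_or_lt_of_le (not_lt.mp hkr) with rfl | hrk
            · exact le_refl _
            · exact List.pairwise_iff_getElem.mp hgs r k hrlen hk hrk
          rw [hkeq] at hle
          exact absurd (lt_of_lt_of_le hflt hle) (lt_irrefl f)
      rw [if_neg hcase, ih (acc ++ [f]) r htsorted hinv']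
      simp [hnotmem]

-- ===== VERDICT (by name: the statement is the Claim_ definition above) =====
theorem findDoNotFollowBack_spec : Claim_equal_findDoNotFollowBack := by
  intro followers following _
  unfold Spec_findDoNotFollowBack findDoNotFollowBack findDoNotFollowBack_alt
  set fs := PySem.List.sorted followers (fun x => x) false with hfs
  set gs := PySem.List.sorted following (fun x => x) false with hgs
  have hA : (PySem.List.pyRange 0 (fs.length : Int) 1).foldl
      (fun acc i =>
        match PySem.List.index? gs (PySem.List.pyGetD fs i "") with
        | some _ => acc
        | none => acc ++ [PySem.List.pyGetD fs i ""]) []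
      = fs.foldl
        (fun acc f =>
          match PySem.List.index? gs f with
          | some _ => acc
          | none => acc ++ [f]) [] := by
    exact PySem.List.foldl_pyRange_zero_pyGetD' fs ""
      (fun acc f =>
        match PySem.List.index? gs f with
        | some _ => acc
        | none => acc ++ [f]) []
  rw [hA, pvA_foldl_filter gs fs []]
  have hgss : gs.Pairwise (· ≤ ·) := by
    have := PySem.List.sorted_pairwise (xs := following) (key := fun x => x)
    simpa [hgs] using this
  have hfss : fs.Pairwise (· ≤ ·) := by
    have := PySem.List.sorted_pairwise (xs := followers) (key := fun x => x)
    simpa [hfs] using this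
  rw [pvB_foldl_filter gs hgss fs [] 0 hfss (by intro k hk; omega)]
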